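-- pv_equiv track=rewrite | github.com/nossa-ufsc/cardapios-ufsc | app/curitibanos.py | processar_tabela_semana
-- ===== SOURCE A (Python) =====
-- def processar_tabela_semana(tabelas):
--     if not tabelas:
--         return []
--
--     resultados = []
--
--     for tabela in tabelas:
--         if not tabela:
--             resultados.append([])
--             continue
--
--         max_cols = max(len(linha) for linha in tabela)
--
--         colunas_agrupadas = []
--         for col_idx in range(max_cols):
--             coluna = []
--             for linha in tabela:
--                 if col_idx < len(linha):
--                     coluna.append(linha[col_idx])
--                 else:
--                     coluna.append(None)
--             colunas_agrupadas.append(coluna)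
--
--         colunas_agrupadas[0][0] = "DIA"
--         resultados.append(colunas_agrupadas)
--
--     return resultados
-- ===== SOURCE B (Python) =====
-- def processar_tabela_semana(tabelas):
--     if not tabelas:
--         return []
--     resultados = []
--     for tabela in tabelas:
--         if not tabela:
--             resultados.append([])
--             continue
--         # single pass over the rows, growing the column lists incrementally
--         colunas = []
--         vistos = 0
--         for linha in tabela:
--             while len(colunas) < len(linha):
--                 colunas.append([None] * vistos)
--             for j, col in enumerate(colunas):
--                 col.append(linha[j] if j < len(linha) else None)
--             vistos += 1
--         colunas[0][0] = "DIA"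
--         resultados.append(colunas)
--     return resultados
-- ===== Notes on version B (the rewrite author's own statement) =====
-- stated objective: alternative
-- what changed: Replaces the two-stage per-table scheme (compute max_cols, then for each column index rescan every row with a bounds check) by a single pass over the rows that builds the column lists incrementally: new columns are created pre-padded with Nones when a longer row appears, and each row appends one cell (or None) to every existing column.
import Mathlib
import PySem

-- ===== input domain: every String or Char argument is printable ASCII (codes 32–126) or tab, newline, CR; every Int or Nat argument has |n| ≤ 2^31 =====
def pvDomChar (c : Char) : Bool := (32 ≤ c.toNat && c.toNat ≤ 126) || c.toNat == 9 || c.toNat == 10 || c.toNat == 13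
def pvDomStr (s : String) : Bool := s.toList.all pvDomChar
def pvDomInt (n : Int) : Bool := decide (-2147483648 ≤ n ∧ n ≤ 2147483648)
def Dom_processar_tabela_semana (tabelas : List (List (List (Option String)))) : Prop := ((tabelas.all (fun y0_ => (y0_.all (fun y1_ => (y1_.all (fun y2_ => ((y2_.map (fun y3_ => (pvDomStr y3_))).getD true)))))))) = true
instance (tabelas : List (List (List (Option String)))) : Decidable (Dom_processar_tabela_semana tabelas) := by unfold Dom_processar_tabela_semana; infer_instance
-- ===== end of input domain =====

-- B builds each table's columns in ONE pass over the rows (new columns created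
-- pre-padded with Nones, one cell appended per column per row), instead of A's
-- max_cols computation followed by a per-column rescan of all rows (objective: alternative).

-- ===== PORT A =====
def processar_tabela_semana (tabelas : List (List (List (Option String)))) : List (List (List (Option String))) :=
  if tabelas = [] then []
  else
    tabelas.foldl (fun resultados tabela =>
      if tabela = [] then resultados ++ [[]]
      else
        let max_cols := (PySem.List.max? (tabela.map (fun linha => linha.length)) (fun x => x)).getD 0
        let colunas_agrupadas := (List.range max_cols).map (fun col_idx =>
          tabela.map (fun linha => if col_idx < linha.length then linha.getD col_idx none else none))
        let colunas_agrupadas' := colunas_agrupadas.set 0 ((colunas_agrupadas.getD 0 []).set 0 (some "DIA"))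
        resultados ++ [colunas_agrupadas']) []

-- ===== PORT B =====
-- one row of the inner loop: grow `colunas` (while-loop appends replicate-vistos-None
-- columns until there are len(linha) of them), then append one cell to every column
def pvLinhaStep (st : List (List (Option String)) × Nat) (linha : List (Option String)) :
    List (List (Option String)) × Nat :=
  let colunas := st.1 ++ (List.range (linha.length - st.1.length)).map (fun _ => List.replicate st.2 none)
  (colunas.mapIdx (fun j col => col ++ [if j < linha.length then linha.getD j none else none]), st.2 + 1)

def processar_tabela_semana_alt (tabelas : List (List (List (Option String)))) : List (List (List (Option String))) :=
  if tabelas = [] then []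
  else
    tabelas.foldl (fun resultados tabela =>
      if tabela = [] then resultados ++ [[]]
      else
        let colunas := (tabela.foldl pvLinhaStep ([], 0)).1
        resultados ++ [colunas.set 0 ((colunas.getD 0 []).set 0 (some "DIA"))]) []

-- ===== PRECONDITION & SPEC =====
-- Pre_ excludes inputs on which Python A raises IndexError (a non-empty table all of
-- whose rows are empty: max_cols is 0 and `colunas_agrupadas[0][0]` fails); B raises there too.
def Pre_processar_tabela_semana (tabelas : List (List (List (Option String)))) : Prop :=
  ∀ tabela ∈ tabelas, tabela ≠ [] → ∃ linha ∈ tabela, linha ≠ []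
instance (tabelas : List (List (List (Option String)))) : Decidable (Pre_processar_tabela_semana tabelas) := by unfold Pre_processar_tabela_semana; infer_instance
def pvWitness_processar_tabela_semana : List (List (List (Option String))) :=
  [[[some "a", none], [none]], []]

def Spec_processar_tabela_semana (tabelas : List (List (List (Option String)))) (out : List (List (List (Option String)))) : Prop := out = processar_tabela_semana_alt tabelas
instance (tabelas : List (List (List (Option String)))) (out : List (List (List (Option String)))) : Decidable (Spec_processar_tabela_semana tabelas out) := by unfold Spec_processar_tabela_semana; infer_instance

-- ===== CLAIM (what is proved, stated in full; the proofs are below) =====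
def Claim_equal_processar_tabela_semana : Prop := ∀ (tabelas : List (List (List (Option String)))), Dom_processar_tabela_semana tabelas → Pre_processar_tabela_semana tabelas → Spec_processar_tabela_semana tabelas (processar_tabela_semana tabelas)

-- ===== LEMMAS AND PROOFS =====

def pvMaxLen (rows : List (List (Option String))) : Nat :=
  (rows.map List.length).foldr max 0

def pvCols (rows : List (List (Option String))) : List (List (Option String)) :=
  (List.range (pvMaxLen rows)).map (fun col_idx =>
    rows.map (fun linha => if col_idx < linha.length then linha.getD col_idx none else none))

lemma pvMaxLen_append_singleton (done : List (List (Option String))) (linha : List (Option String)) :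
    pvMaxLen (done ++ [linha]) = max (pvMaxLen done) linha.length := by
  induction done with
  | nil => simp [pvMaxLen]
  | cons r t ih =>
    simp only [pvMaxLen, List.cons_append, List.map_cons, List.foldr_cons] at *
    omega

lemma length_le_pvMaxLen (rows : List (List (Option String))) (l : List (Option String))
    (hl : l ∈ rows) : l.length ≤ pvMaxLen rows := by
  induction rows with
  | nil => simp at hl
  | cons r t ih =>
    simp only [pvMaxLen, List.map_cons, List.foldr_cons]
    rcases List.mem_cons.mp hl with h | h
    · subst h; omega
    · have := ih h
      simp only [pvMaxLen] at this
      omega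

lemma pvLinhaStep_snapshot (done : List (List (Option String))) (linha : List (Option String)) :
    pvLinhaStep (pvCols done, done.length) linha = (pvCols (done ++ [linha]), done.length + 1) := by
  unfold pvLinhaStep
  refine Prod.ext ?_ rfl
  simp only
  apply List.ext_getElem
  · simp [pvCols, pvMaxLen_append_singleton]; omega
  · intro i hi hi'
    rw [List.getElem_mapIdx]
    by_cases hc : i < pvMaxLen done
    · rw [List.getElem_append_left (by simpa [pvCols] using hc)]
      simp [pvCols]
    · have hrep : done.map (fun linha => if i < linha.length then linha.getD i none else none)
          = List.replicate done.length (none : Option String) := by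
        apply List.eq_replicate_iff.mpr
        refine ⟨by simp, ?_⟩
        intro b hb
        rcases List.mem_map.mp hb with ⟨l, hl, hbl⟩
        have := length_le_pvMaxLen done l hl
        rw [← hbl, if_neg (by omega)]
      rw [List.getElem_append_right (by simp [pvCols]; omega)]
      simp [pvCols]
      exact hrep.symm

lemma pvFoldl_linhas (rest done : List (List (Option String))) :
    rest.foldl pvLinhaStep (pvCols done, done.length)
      = (pvCols (done ++ rest), done.length + rest.length) := by
  induction rest generalizing done with
  | nil => simp
  | cons linha t ih =>
    rw [List.foldl_cons, pvLinhaStep_snapshot,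
        show done.length + 1 = (done ++ [linha]).length by simp,
        ih (done ++ [linha])]
    refine Prod.ext (by simp) (by simp; omega)

lemma pvFoldl_linhas_nil (tabela : List (List (Option String))) :
    (tabela.foldl pvLinhaStep ([], 0)).1 = pvCols tabela := by
  have h0 : (([] : List (List (Option String))), 0) = (pvCols [], ([] : List (List (Option String))).length) := by
    simp [pvCols, pvMaxLen]
  rw [h0, pvFoldl_linhas]
  simp

lemma pvFoldlMax_eq (xs : List Nat) (a : Nat) :
    xs.foldl max a = max a (xs.foldr max 0) := by
  induction xs generalizing a with
  | nil => simp
  | cons x t ih => rw [List.foldl_cons, ih, List.foldr_cons]; omega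

lemma pvMaxCols_eq (tabela : List (List (Option String))) (h : tabela ≠ []) :
    (PySem.List.max? (tabela.map (fun linha => linha.length)) (fun x => x)).getD 0
      = pvMaxLen tabela := by
  cases tabela with
  | nil => exact absurd rfl h
  | cons l t =>
    rw [List.map_cons, PySem.List.max?_id_cons, Option.getD_some, pvFoldlMax_eq, pvMaxLen]
    simp

def pvTab (tabela : List (List (Option String))) : List (List (Option String)) :=
  if tabela = [] then []
  else (pvCols tabela).set 0 (((pvCols tabela).getD 0 []).set 0 (some "DIA"))

lemma pvFoldlA_eq_map (tabelas : List (List (List (Option String)))) (acc : List (List (List (Option String)))) :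
    tabelas.foldl (fun resultados tabela =>
      if tabela = [] then resultados ++ [[]]
      else
        let max_cols := (PySem.List.max? (tabela.map (fun linha => linha.length)) (fun x => x)).getD 0
        let colunas_agrupadas := (List.range max_cols).map (fun col_idx =>
          tabela.map (fun linha => if col_idx < linha.length then linha.getD col_idx none else none))
        let colunas_agrupadas' := colunas_agrupadas.set 0 ((colunas_agrupadas.getD 0 []).set 0 (some "DIA"))
        resultados ++ [colunas_agrupadas']) acc = acc ++ tabelas.map pvTab := by
  induction tabelas generalizing acc with
  | nil => simp
  | cons tabela t ih =>
    rw [List.foldl_cons, List.map_cons]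
    by_cases h : tabela = []
    · rw [if_pos h, ih]
      simp [h, pvTab]
    · rw [if_neg h, ih]
      simp only [pvMaxCols_eq tabela h, pvTab, if_neg h, pvCols,
        List.append_assoc, List.singleton_append]

lemma pvFoldlB_eq_map (tabelas : List (List (List (Option String)))) (acc : List (List (List (Option String)))) :
    tabelas.foldl (fun resultados tabela =>
      if tabela = [] then resultados ++ [[]]
      else
        let colunas := (tabela.foldl pvLinhaStep ([], 0)).1
        resultados ++ [colunas.set 0 ((colunas.getD 0 []).set 0 (some "DIA"))]) acc
      = acc ++ tabelas.map pvTab := by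
  induction tabelas generalizing acc with
  | nil => simp
  | cons tabela t ih =>
    rw [List.foldl_cons, List.map_cons]
    by_cases h : tabela = []
    · rw [if_pos h, ih]
      simp [h, pvTab]
    · rw [if_neg h, ih]
      simp only [pvFoldl_linhas_nil, pvTab, if_neg h,
        List.append_assoc, List.singleton_append]

-- ===== VERDICT (by name: the statement is the Claim_ definition above) =====
theorem processar_tabela_semana_spec : Claim_equal_processar_tabela_semana := by
  intro tabelas _ _
  unfold Spec_processar_tabela_semana processar_tabela_semana processar_tabela_semana_alt
  by_cases h : tabelas = []
  · simp [h]
  · rw [if_neg h, if_neg h, pvFoldlA_eq_map, pvFoldlB_eq_map]
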